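-- pv_equiv track=rewrite | github.com/grnydawn/fasin2 | fasin/preprocess.py | _fixed2freeform
-- ===== SOURCE A (Python) =====
-- def _fixed2freeform(text, isstrict):
--     buf = []
--     lines = text.split("\n")
--     N = len(lines)
--     for line0, line1 in zip(lines[:N-1], lines[1:N]):
--         L0 = len(line0)
--         L1 = len(line1)
--         processed = False
--         for idx, ch in enumerate(line0[:min(6,L0)]):
--             if idx==0:
--                 if line0[0] in ["!", "C", "*"]:
--                     buf.append("!"+line0[1:])
--                     processed = True
--                     break
--             elif idx>0 and idx<5:
--                 if line0[idx] == "!":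
--                     buf.append(line0)
--                     processed = True
--                     break
--         if not processed:
--             tmp = []
--             if L0>5:
--                 if line0[5] not in [" ", "0"]:
--                     tmp.append("&")
--                 tmp.append(line0[6:])
--             if L1>5:
--                 if line1[5] not in [" ", "0"]:
--                     tmp.append("&")
--             if tmp:
--                 buf.append(''.join(tmp))
--     return "\n".join(buf)+"\n"
-- ===== SOURCE B (Python) =====
-- def _fixed2freeform(text, isstrict):
--     lines = text.split("\n")
--     out = []
--     # prev: None = previous line was a comment (or there is none);
--     # True = previous code line emitted an entry; False = it emitted nothing
--     prev = None
--     for i, l in enumerate(lines):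
--         # back-patch the trailing '&' owed by the previous code line
--         if prev is not None and len(l) > 5 and l[5] not in " 0":
--             if prev:
--                 out[-1] += "&"
--             else:
--                 out.append("&")
--         if i == len(lines) - 1:
--             break
--         if l[:1] in ("!", "C", "*"):
--             out.append("!" + l[1:])
--             prev = None
--         elif "!" in l[1:5]:
--             out.append(l)
--             prev = None
--         elif len(l) > 5:
--             out.append(("&" if l[5] not in " 0" else "") + l[6:])
--             prev = True
--         else:
--             prev = False
--     return "\n".join(out) + "\n"
-- ===== Notes on version B (the rewrite author's own statement) =====
-- stated objective: alternative
-- what changed: Replaces A's pairwise look-ahead pass (zip of adjacent lines with an inner enumerate/break scan and a tmp-list join per pair) by a single stateful pass over the lines themselves that back-patches the trailing '&' onto the previously emitted entry when the current line carries a column-6 continuation mark.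
import Mathlib
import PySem

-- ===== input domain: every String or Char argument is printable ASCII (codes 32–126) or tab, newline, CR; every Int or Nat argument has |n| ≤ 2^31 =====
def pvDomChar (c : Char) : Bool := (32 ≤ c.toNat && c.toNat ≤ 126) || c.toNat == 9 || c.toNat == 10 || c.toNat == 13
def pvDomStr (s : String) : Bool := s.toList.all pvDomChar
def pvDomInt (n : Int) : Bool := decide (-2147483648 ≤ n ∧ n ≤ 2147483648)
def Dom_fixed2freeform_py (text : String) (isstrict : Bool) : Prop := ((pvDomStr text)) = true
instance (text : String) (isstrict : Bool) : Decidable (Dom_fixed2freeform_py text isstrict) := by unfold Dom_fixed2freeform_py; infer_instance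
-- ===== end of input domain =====

-- B replaces A's pairwise look-ahead pass (zip of adjacent lines, inner enumerate/break scan,
-- tmp-list join) by one stateful pass over the lines that back-patches the trailing '&' onto
-- the previously emitted entry (alternative decomposition, same values).

-- ===== PORT A =====
-- inner 'for idx, ch in enumerate(line0[:min(6,L0)]): … break' loop of A:
-- returns some appended-line if 'processed', none otherwise
def pvInnerA (line0 : List Char) : List (Int × Char) → Option (List Char)
  | [] => none
  | (idx, _ch) :: rest =>
    if idx = 0 then
      if PySem.List.pyGetD line0 0 ' ' ∈ ['!', 'C', '*'] then
        some ('!' :: PySem.List.slice line0 (some 1) none)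
      else pvInnerA line0 rest
    else if idx > 0 ∧ idx < 5 then
      if PySem.List.pyGetD line0 idx ' ' = '!' then some line0
      else pvInnerA line0 rest
    else pvInnerA line0 rest

-- outer 'for line0, line1 in zip(…)' loop of A, with the accumulator buf
def pvOuterA : List (List Char × List Char) → List (List Char) → List (List Char)
  | [], buf => buf
  | (line0, line1) :: rest, buf =>
    let L0 : Int := line0.length
    let L1 : Int := line1.length
    match pvInnerA line0 (PySem.List.enumerate (PySem.List.slice line0 none (some (min 6 L0)))) with
    | some piece => pvOuterA rest (buf ++ [piece])
    | none =>
      let tmp : List (List Char) :=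
        (if L0 > 5 then
          (if PySem.List.pyGetD line0 5 ' ' ∉ [' ', '0'] then [['&']] else [])
          ++ [PySem.List.slice line0 (some 6) none]
        else [])
        ++ (if L1 > 5 then
              (if PySem.List.pyGetD line1 5 ' ' ∉ [' ', '0'] then [['&']] else [])
            else [])
      if tmp ≠ [] then pvOuterA rest (buf ++ [PySem.Chars.join [] tmp]) else pvOuterA rest buf

def fixed2freeform_py (text : String) (isstrict : Bool) : String :=
  let lines := PySem.Chars.splitOn text.toList ['\n']
  let N : Int := lines.length
  let pairs := List.zip (PySem.List.slice lines none (some (N - 1)))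
                        (PySem.List.slice lines (some 1) (some N))
  String.ofList (PySem.Chars.join ['\n'] (pvOuterA pairs []) ++ ['\n'])

-- ===== PORT B =====
-- 'len(l) > 5 and l[5] not in " 0"' of Source B
def pvContB (l : List Char) : Bool :=
  decide (5 < l.length) && decide (PySem.List.pyGetD l 5 ' ' ∉ [' ', '0'])

-- the back-patch block at the top of Source B's loop body ('out[-1] += "&"' is the
-- last-element update, defined when prev = some true since out is then nonempty)
def pvPatch (out : List (List Char)) (prev : Option Bool) (l : List Char) : List (List Char) :=
  if prev.isSome && pvContB l then
    (if prev = some true then out.dropLast ++ [(out.getLast?.getD []) ++ ['&']]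
     else out ++ [['&']])
  else out

-- Source B's single 'for i, l in enumerate(lines)' loop; 'if i == len(lines)-1: break'
-- is the match on rest = []
def pvLoopB : List (List Char) → List (List Char) → Option Bool → List (List Char)
  | [], out, _ => out
  | l :: rest, out, prev =>
    let out' := pvPatch out prev l
    match rest with
    | [] => out'
    | _ :: _ =>
      if PySem.List.slice l none (some 1) ∈ [['!'], ['C'], ['*']] then
        pvLoopB rest (out' ++ ['!' :: PySem.List.slice l (some 1) none]) none
      else if PySem.Chars.isIn ['!'] (PySem.List.slice l (some 1) (some 5)) then
        pvLoopB rest (out' ++ [l]) none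
      else if 5 < l.length then
        pvLoopB rest (out' ++ [(if PySem.List.pyGetD l 5 ' ' ∉ [' ', '0'] then ['&'] else [])
                               ++ PySem.List.slice l (some 6) none]) (some true)
      else
        pvLoopB rest out' (some false)

def fixed2freeform_py_alt (text : String) (isstrict : Bool) : String :=
  let lines := PySem.Chars.splitOn text.toList ['\n']
  String.ofList (PySem.Chars.join ['\n'] (pvLoopB lines [] none) ++ ['\n'])

-- ===== PRECONDITION & SPEC =====
def Spec_fixed2freeform_py (text : String) (isstrict : Bool) (out : String) : Prop := out = fixed2freeform_py_alt text isstrict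
instance (text : String) (isstrict : Bool) (out : String) : Decidable (Spec_fixed2freeform_py text isstrict out) := by unfold Spec_fixed2freeform_py; infer_instance

-- ===== CLAIM (what is proved, stated in full; the proofs are below) =====
def Claim_equal_fixed2freeform_py : Prop := ∀ (text : String) (isstrict : Bool), Dom_fixed2freeform_py text isstrict → Spec_fixed2freeform_py text isstrict (fixed2freeform_py text isstrict)

-- ===== LEMMAS AND PROOFS =====

-- proof-side classification of a line (matches Source B's branch structure)
def pvClass (a : List Char) : Option Bool :=
  if PySem.List.slice a none (some 1) ∈ [['!'], ['C'], ['*']] then none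
  else if PySem.Chars.isIn ['!'] (PySem.List.slice a (some 1) (some 5)) then none
  else if 5 < a.length then some true else some false

-- the entry Source B emits for a non-final line (before any later back-patch)
def pvHead (a : List Char) : List (List Char) :=
  if PySem.List.slice a none (some 1) ∈ [['!'], ['C'], ['*']] then
    ['!' :: PySem.List.slice a (some 1) none]
  else if PySem.Chars.isIn ['!'] (PySem.List.slice a (some 1) (some 5)) then [a]
  else if 5 < a.length then
    [(if PySem.List.pyGetD a 5 ' ' ∉ [' ', '0'] then ['&'] else []) ++ PySem.List.slice a (some 6) none]
  else []

-- the entry (0 or 1) A emits for the pair (a, b)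
def pvEmitA (a b : List Char) : List (List Char) :=
  if PySem.List.slice a none (some 1) ∈ [['!'], ['C'], ['*']] then
    ['!' :: PySem.List.slice a (some 1) none]
  else if PySem.Chars.isIn ['!'] (PySem.List.slice a (some 1) (some 5)) then [a]
  else if 5 < a.length ∨ pvContB b = true then
    [(if 5 < a.length then
        (if PySem.List.pyGetD a 5 ' ' ∉ [' ', '0'] then ['&'] else []) ++ PySem.List.slice a (some 6) none
      else []) ++ (if pvContB b then ['&'] else [])]
  else []

theorem pv_isIn_singleton (c : Char) (xs : List Char) : PySem.Chars.isIn [c] xs = xs.contains c := by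
  apply Bool.eq_iff_iff.mpr
  simp [PySem.Chars.isIn_iff_infix, List.singleton_infix_iff]

theorem pv_zip_take {α : Type} (xs : List α) : ∀ (ys : List α), (xs.take ys.length).zip ys = xs.zip ys := by
  induction xs with
  | nil => simp
  | cons a t ih =>
    intro ys
    cases ys with
    | nil => simp
    | cons b u => simp [ih u]

-- A's zip of slices is zip lines lines.tail
theorem pv_pairs_eq (ls : List (List Char)) :
    List.zip (PySem.List.slice ls none (some ((ls.length : Int) - 1)))
             (PySem.List.slice ls (some 1) (some (ls.length : Int)))
    = List.zip ls ls.tail := by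
  cases ls with
  | nil => simp [PySem.List.slice]
  | cons a t =>
    have h1 : ((a :: t).length : Int) - 1 = (t.length : Int) := by simp
    rw [h1, PySem.List.slice_to_natCast, PySem.List.slice_toNat _ (by omega) (by positivity)]
    simp [pv_zip_take]

-- classification of A's inner loop by B's two flat tests
theorem pv_inner_class (l : List Char) :
    pvInnerA l (PySem.List.enumerate (PySem.List.slice l none (some (min 6 (l.length : Int)))))
    = (if PySem.List.slice l none (some 1) ∈ [['!'], ['C'], ['*']] then
         some ('!' :: PySem.List.slice l (some 1) none)
       else if PySem.Chars.isIn ['!'] (PySem.List.slice l (some 1) (some 5)) then some l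
       else none) := by
  rcases l with _|⟨c0,_|⟨c1,_|⟨c2,_|⟨c3,_|⟨c4,_|⟨c5,rest⟩⟩⟩⟩⟩⟩ <;>
    simp [pv_isIn_singleton, pvInnerA, PySem.List.enumerate, PySem.List.pyGetD_ofNat',
          PySem.List.slice_to, PySem.List.slice_toNat] <;>
    (try (split_ifs <;> tauto))
  rw [show min (6:Int) ((rest.length:Int)+1+1+1+1+1+1) = ((6:Nat):Int) from by push_cast; omega,
     PySem.List.slice_to_natCast]
  simp [pvInnerA, PySem.List.enumerate, PySem.List.pyGetD_ofNat']
  split_ifs <;> tauto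

-- one step of A's outer loop emits pvEmitA
theorem pv_stepA (a b : List Char) (ps : List (List Char × List Char)) (buf : List (List Char)) :
    pvOuterA ((a, b) :: ps) buf = pvOuterA ps (buf ++ pvEmitA a b) := by
  simp only [pvOuterA]
  rw [pv_inner_class]
  by_cases h1 : PySem.List.slice a none (some 1) ∈ [['!'], ['C'], ['*']]
  · simp [h1, pvEmitA]
  · by_cases h2 : PySem.Chars.isIn ['!'] (PySem.List.slice a (some 1) (some 5)) = true
    · simp [h1, h2, pvEmitA]
    · simp only [h1, h2, pvEmitA, pvContB, if_false]
      by_cases hA : 5 < a.length <;> by_cases hB : 5 < b.length <;>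
        by_cases hA5 : PySem.List.pyGetD a 5 ' ' ∉ [' ', '0'] <;>
        by_cases hB5 : PySem.List.pyGetD b 5 ' ' ∉ [' ', '0'] <;>
        simp_all [PySem.Chars.join] <;> ((try split_ifs) <;> (try simp [List.intercalate]) <;> (try omega) <;> (try tauto))

-- the back-patch of b applied to what Source B has after emitting for a equals A's pair entry
theorem pv_patch_eq (a b : List Char) (buf : List (List Char)) :
    pvPatch (buf ++ pvHead a) (pvClass a) b = buf ++ pvEmitA a b := by
  unfold pvPatch pvHead pvClass pvEmitA
  by_cases h1 : PySem.List.slice a none (some 1) ∈ [['!'], ['C'], ['*']]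
  · simp [h1]
  · by_cases h2 : PySem.Chars.isIn ['!'] (PySem.List.slice a (some 1) (some 5)) = true
    · simp [h1, h2]
    · by_cases hA : 5 < a.length
      · by_cases hb : pvContB b = true <;>
          simp [h1, h2, hA, hb]
      · by_cases hb : pvContB b = true <;> simp [h1, h2, hA, hb]

-- Source B's loop step for a non-final line emits pvHead and carries pvClass
theorem pv_stepB (l : List Char) (b : List Char) (u : List (List Char))
    (out : List (List Char)) (prev : Option Bool) :
    pvLoopB (l :: b :: u) out prev
    = pvLoopB (b :: u) (pvPatch out prev l ++ pvHead l) (pvClass l) := by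
  conv_lhs => rw [pvLoopB]
  unfold pvHead pvClass
  split_ifs <;> simp

-- main invariant: B's remaining loop from the state after line a equals A's remaining pairs
theorem pv_main (ls : List (List Char)) : ∀ (a : List Char) (buf : List (List Char)),
    pvLoopB ls (buf ++ pvHead a) (pvClass a)
    = pvOuterA (List.zip (a :: ls) ls) buf ++ (if ls = [] then pvHead a else []) := by
  induction ls with
  | nil => intro a buf; simp [pvLoopB, pvOuterA]
  | cons b u ih =>
    intro a buf
    cases u with
    | nil =>
      show pvLoopB [b] _ _ = _
      simp only [pvLoopB, pv_patch_eq]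
      rw [show List.zip (a :: [b]) [b] = [(a, b)] from rfl, pv_stepA]
      simp [pvOuterA]
    | cons c v =>
      rw [pv_stepB, pv_patch_eq, ih b (buf ++ pvEmitA a b)]
      rw [show List.zip (a :: b :: c :: v) (b :: c :: v) = (a, b) :: List.zip (b :: c :: v) (c :: v) from rfl,
          pv_stepA]
      simp

-- ===== VERDICT (by name: the statement is the Claim_ definition above) =====
theorem fixed2freeform_py_spec : Claim_equal_fixed2freeform_py := by
  intro text isstrict _
  unfold Spec_fixed2freeform_py fixed2freeform_py fixed2freeform_py_alt
  simp only []
  rw [pv_pairs_eq]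
  cases h : PySem.Chars.splitOn text.toList ['\n'] with
  | nil => simp [pvLoopB, pvOuterA]
  | cons a ls =>
    cases ls with
    | nil => simp [pvLoopB, pvPatch, pvOuterA]
    | cons b u =>
      have hstep : pvLoopB (a :: b :: u) [] none
          = pvLoopB (b :: u) (([] : List (List Char)) ++ pvHead a) (pvClass a) := by
        have := pv_stepB a b u [] none
        simpa [pvPatch] using this
      rw [hstep, pv_main]
      simp
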